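-- pv_equiv track=rewrite | github.com/kugguk2022/zyntalic_schelling_trainer | zyntalic/documentation.py | _format_phoneme_table
-- ===== SOURCE A (Python) =====
-- from typing import Dict, List, Optional, Set, Tuple, Union
--
-- def _format_phoneme_table(phoneme_dict: Dict[str, str]) -> str:
--     """Format phoneme inventory as table."""
--     lines = []
--     items = list(phoneme_dict.items())
--
--     for i in range(0, len(items), 4):  # 4 columns
--         row = items[i:i+4]
--         formatted_row = " | ".join(f"{symbol} /{ipa}/" for symbol, ipa in row)
--         lines.append(formatted_row)
--
--     return "\n".join(f"| {line} |" for line in lines)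
-- ===== SOURCE B (Python) =====
-- def _format_phoneme_table(phoneme_dict):
--     """Format phoneme inventory as table (single pass with a 4-cell buffer)."""
--     lines = []
--     current = []
--     for symbol, ipa in phoneme_dict.items():
--         current.append(f"{symbol} /{ipa}/")
--         if len(current) == 4:
--             lines.append("| " + " | ".join(current) + " |")
--             current = []
--     if current:
--         lines.append("| " + " | ".join(current) + " |")
--     return "\n".join(lines)
-- ===== Notes on version B (the rewrite author's own statement) =====
-- stated objective: alternative
-- what changed: Replaces the range(0,n,4) index-slicing pass plus a second wrapping join-pass with a single pass over the items that buffers 4 formatted cells, flushes each full (and the trailing partial) buffer as an already-wrapped row, so no slicing and no second map over lines.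
import Mathlib
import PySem

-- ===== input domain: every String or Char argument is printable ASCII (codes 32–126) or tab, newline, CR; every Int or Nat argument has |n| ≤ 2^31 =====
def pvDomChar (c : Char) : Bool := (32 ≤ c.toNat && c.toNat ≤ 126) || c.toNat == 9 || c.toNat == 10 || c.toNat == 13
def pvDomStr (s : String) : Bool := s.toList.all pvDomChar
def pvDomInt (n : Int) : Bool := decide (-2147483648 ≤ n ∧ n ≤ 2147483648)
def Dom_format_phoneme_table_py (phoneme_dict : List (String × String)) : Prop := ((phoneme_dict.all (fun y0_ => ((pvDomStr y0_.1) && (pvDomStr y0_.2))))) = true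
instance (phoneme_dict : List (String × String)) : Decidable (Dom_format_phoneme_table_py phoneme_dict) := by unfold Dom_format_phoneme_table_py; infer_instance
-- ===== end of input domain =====

-- B replaces A's range(0,n,4) slicing pass (plus a second wrapping pass over lines) by one
-- buffered pass that flushes every 4 formatted cells as an already-wrapped row: alternative
-- decomposition, same cost. Equivalence of the RETURN value is proved on the whole domain.

-- ===== PORT A =====
def format_phoneme_table_py (phoneme_dict : List (String × String)) : String :=
  let items := (PySem.Dict.ofList phoneme_dict).items
  let lines : List String :=
    (PySem.List.pyRange 0 (items.length : Int) 4).foldl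
      (fun lines i =>
        let row := PySem.List.slice items (some i) (some (i + 4))
        let formatted_row :=
          PySem.Str.join " | " (row.map (fun p => p.1 ++ " /" ++ p.2 ++ "/"))
        lines ++ [formatted_row]) []
  PySem.Str.join "\n" (lines.map (fun line => "| " ++ line ++ " |"))

-- ===== PORT B =====
def format_phoneme_table_py_alt (phoneme_dict : List (String × String)) : String :=
  let st :=
    ((PySem.Dict.ofList phoneme_dict).items).foldl
      (fun (st : List String × List String) p =>
        let current := st.2 ++ [p.1 ++ " /" ++ p.2 ++ "/"]
        if current.length = 4 then
          (st.1 ++ ["| " ++ PySem.Str.join " | " current ++ " |"], [])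
        else (st.1, current)) ([], [])
  let lines := if st.2 = [] then st.1 else st.1 ++ ["| " ++ PySem.Str.join " | " st.2 ++ " |"]
  PySem.Str.join "\n" lines

-- ===== PRECONDITION & SPEC =====
def Spec_format_phoneme_table_py (phoneme_dict : List (String × String)) (out : String) : Prop := out = format_phoneme_table_py_alt phoneme_dict
instance (phoneme_dict : List (String × String)) (out : String) : Decidable (Spec_format_phoneme_table_py phoneme_dict out) := by unfold Spec_format_phoneme_table_py; infer_instance

-- ===== CLAIM (what is proved, stated in full; the proofs are below) =====
def Claim_equal_format_phoneme_table_py : Prop := ∀ (phoneme_dict : List (String × String)), Dom_format_phoneme_table_py phoneme_dict → Spec_format_phoneme_table_py phoneme_dict (format_phoneme_table_py phoneme_dict)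

-- ===== LEMMAS AND PROOFS =====

-- the formatted cell f"{symbol} /{ipa}/" and the wrapped row "| … |"
def pvCell (p : String × String) : String := p.1 ++ " /" ++ p.2 ++ "/"
def pvRow (r : List (String × String)) : String :=
  "| " ++ PySem.Str.join " | " (r.map pvCell) ++ " |"

-- the list split into consecutive chunks of 4 (last one possibly shorter)
def pvChunk4 {α : Type} : List α → List (List α)
  | [] => []
  | x :: xs => (x :: xs).take 4 :: pvChunk4 ((x :: xs).drop 4)
termination_by xs => xs.length
decreasing_by simp

-- A's slice rows are exactly the chunks
lemma pv_chunk_map {α : Type} (xs : List α) :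
    (List.range ((xs.length + 3) / 4)).map (fun k => (xs.drop (4 * k)).take 4)
      = pvChunk4 xs := by
  induction hn : xs.length using Nat.strong_induction_on generalizing xs with
  | _ n ih =>
    subst hn
    rcases xs with _ | ⟨a, rest⟩
    · simp [pvChunk4]
    · rw [pvChunk4]
      have hM : ((a :: rest).length + 3) / 4 = ((rest.length - 3) + 3) / 4 + 1 := by
        simp; omega
      have hd : (a :: rest).drop 4 = rest.drop 3 := by simp
      rw [hM, hd, List.range_succ_eq_map, List.map_cons]
      have := ih (rest.length - 3) (by simp only [List.length_cons]; omega) (rest.drop 3) (by simp)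
      rw [← this]
      congr 1
      rw [List.map_map]
      apply List.map_congr_left
      intro k hk
      simp only [Function.comp_apply]
      rw [List.drop_drop, show 4 * (k + 1) = (4 * k + 3) + 1 from by omega,
        List.drop_succ_cons, show 4 * k + 3 = 3 + 4 * k from by omega]

lemma pv_slice_chunk {α : Type} (xs : List α) (k : Nat) :
    PySem.List.slice xs (some (0 + 4 * (k : Int))) (some (0 + 4 * (k : Int) + 4))
      = (xs.drop (4 * k)).take 4 := by
  have h : (0 + 4 * (k : Int)) = ((4 * k : Nat) : Int) := by push_cast; ring
  rw [h, show ((4 * k : Nat) : Int) + 4 = ((4 * k : Nat) : Int) + ((4 : Nat) : Int) from by norm_num,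
    PySem.List.slice_natCast_add]

lemma pv_rows_eq {α : Type} (xs : List α) :
    (PySem.List.pyRange 0 (xs.length : Int) 4).map
      (fun i => PySem.List.slice xs (some i) (some (i + 4))) = pvChunk4 xs := by
  rw [PySem.List.pyRange_of_pos 0 (xs.length : Int) (by norm_num)]
  have hM : (if (0 : Int) < (xs.length : Int) then (((xs.length : Int) - 0 + 4 - 1) / 4).toNat else 0)
      = (xs.length + 3) / 4 := by
    rcases Nat.eq_zero_or_pos xs.length with h | h
    · simp [h]
    · have h0 : (0 : Int) < (xs.length : Int) := by exact_mod_cast h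
      rw [if_pos h0]
      have : ((xs.length : Int) - 0 + 4 - 1) = ((xs.length + 3 : Nat) : Int) := by push_cast; ring
      rw [this]
      omega
  rw [hM, List.map_map, ← pv_chunk_map xs]
  apply List.map_congr_left
  intro k _
  simpa using pv_slice_chunk xs k
lemma pv_loop4 (xs : List (String × String)) (lines : List String) (h : 4 ≤ xs.length) :
    xs.foldl
      (fun (st : List String × List String) p =>
        let current := st.2 ++ [p.1 ++ " /" ++ p.2 ++ "/"]
        if current.length = 4 then
          (st.1 ++ ["| " ++ PySem.Str.join " | " current ++ " |"], [])
        else (st.1, current)) (lines, [])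
    = (xs.drop 4).foldl
      (fun (st : List String × List String) p =>
        let current := st.2 ++ [p.1 ++ " /" ++ p.2 ++ "/"]
        if current.length = 4 then
          (st.1 ++ ["| " ++ PySem.Str.join " | " current ++ " |"], [])
        else (st.1, current)) (lines ++ [pvRow (xs.take 4)], []) := by
  rcases xs with _ | ⟨a, _ | ⟨b, _ | ⟨c, _ | ⟨d, rest⟩⟩⟩⟩ <;>
    simp_all [List.foldl, pvCell, pvRow]
lemma pv_loop_small (xs : List (String × String)) (lines : List String) (h : xs.length < 4) :
    xs.foldl
      (fun (st : List String × List String) p =>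
        let current := st.2 ++ [p.1 ++ " /" ++ p.2 ++ "/"]
        if current.length = 4 then
          (st.1 ++ ["| " ++ PySem.Str.join " | " current ++ " |"], [])
        else (st.1, current)) (lines, [])
    = (lines, xs.map pvCell) := by
  rcases xs with _ | ⟨a, _ | ⟨b, _ | ⟨c, _ | ⟨d, rest⟩⟩⟩⟩ <;>
    simp_all [List.foldl, pvCell] <;> omega
lemma pv_main (xs : List (String × String)) (lines : List String) :
    (let st := xs.foldl
      (fun (st : List String × List String) p =>
        let current := st.2 ++ [p.1 ++ " /" ++ p.2 ++ "/"]
        if current.length = 4 then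
          (st.1 ++ ["| " ++ PySem.Str.join " | " current ++ " |"], [])
        else (st.1, current)) (lines, [])
     if st.2 = [] then st.1 else st.1 ++ ["| " ++ PySem.Str.join " | " st.2 ++ " |"])
    = lines ++ (pvChunk4 xs).map pvRow := by
  induction hn : xs.length using Nat.strong_induction_on generalizing xs lines with
  | _ n ih =>
    by_cases h4 : 4 ≤ xs.length
    · rw [pv_loop4 xs lines h4]
      rcases xs with _ | ⟨a, rest⟩
      · simp at h4
      · rw [pvChunk4]
        have := ih ((a :: rest).drop 4).length (by simp at hn ⊢; omega) ((a :: rest).drop 4)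
          (lines ++ [pvRow ((a :: rest).take 4)]) rfl
        simp only [this]
        simp
    · rw [pv_loop_small xs lines (by omega)]
      rcases xs with _ | ⟨a, rest⟩
      · simp [pvChunk4]
      · rw [pvChunk4]
        have hdrop : (a :: rest).drop 4 = [] := List.drop_eq_nil_of_le (by omega)
        have htake : (a :: rest).take 4 = a :: rest := List.take_of_length_le (by omega)
        simp [hdrop, htake, pvChunk4, pvRow, pvCell]
theorem pv_core (d : List (String × String)) :
    format_phoneme_table_py d = format_phoneme_table_py_alt d := by
  unfold format_phoneme_table_py format_phoneme_table_py_alt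
  simp only [PySem.List.foldl_append_singleton_eq_map, List.nil_append]
  rw [pv_main ((PySem.Dict.ofList d).items) [], List.nil_append]
  congr 1
  rw [← pv_rows_eq ((PySem.Dict.ofList d).items), List.map_map, List.map_map]
  apply List.map_congr_left
  intro i _
  rfl
-- ===== VERDICT (by name: the statement is the Claim_ definition above) =====
theorem format_phoneme_table_py_spec : Claim_equal_format_phoneme_table_py := by
  intro d _
  unfold Spec_format_phoneme_table_py
  exact pv_core d
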